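-- pv_equiv track=rewrite | github.com/tahmid-bhuiyan/100-Days-of-Code | BasicProjects/Recursion.py | descendants
-- ===== SOURCE A (Python) =====
-- def descendants(family_tree, name, distance):
-- 	start = 1
-- 	list = []
-- 	for z in family_tree.keys():
-- 		if name == z:
-- 			if distance == start:
-- 				return family_tree[name]
-- 			else:
-- 				for x in family_tree[name]:
-- 					distance = distance - start
-- 					list = list + descendants(family_tree,x,distance)
-- 					distance = distance + start
-- 	return list
-- ===== SOURCE B (Python) =====
-- def descendants(family_tree, name, distance):
--     if distance < 1:
--         return []
--     frontier = [name]
--     for _ in range(distance):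
--         if not frontier:
--             return []
--         frontier = [child for node in frontier if node in family_tree
--                     for child in family_tree[node]]
--     return frontier
-- ===== Notes on version B (the rewrite author's own statement) =====
-- stated objective: alternative
-- what changed: Replaces A's recursion over the tree (a full key scan plus recursive concatenation per child) with an iterative breadth-first loop that advances a frontier list one generation per step, using a direct dict membership test per node and an early exit on an empty frontier.
import Mathlib
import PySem

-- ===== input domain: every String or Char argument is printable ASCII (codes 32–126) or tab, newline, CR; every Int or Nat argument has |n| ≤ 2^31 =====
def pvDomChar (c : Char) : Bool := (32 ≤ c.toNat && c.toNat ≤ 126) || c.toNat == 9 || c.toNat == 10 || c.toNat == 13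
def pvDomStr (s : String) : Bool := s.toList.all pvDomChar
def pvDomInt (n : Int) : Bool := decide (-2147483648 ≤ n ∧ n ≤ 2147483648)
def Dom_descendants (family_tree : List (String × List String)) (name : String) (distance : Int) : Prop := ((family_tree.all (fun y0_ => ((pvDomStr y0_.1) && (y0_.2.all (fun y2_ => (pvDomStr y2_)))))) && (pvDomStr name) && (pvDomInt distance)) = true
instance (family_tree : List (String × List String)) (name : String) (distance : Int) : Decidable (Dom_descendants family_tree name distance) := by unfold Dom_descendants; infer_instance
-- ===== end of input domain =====

-- B replaces A's recursion over the dict with an iterative one-generation-per-step frontier loop (different decomposition, same values).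

-- ===== PORT A =====
-- family_tree[name] (first-match lookup; under Pre_ the keys are the keys of a Python dict, hence distinct)
def pvChildren (family_tree : List (String × List String)) (k : String) : List String :=
  (PySem.Dict.mk family_tree).getD k []

-- A's 'for z in family_tree.keys()' loop, with the early return at distance == 1;
-- 'rec' is the recursive call at distance - 1 (the +1/-1 mutation of `distance` in A cancels each iteration)
def pvALoop (rec : String → List String) (family_tree : List (String × List String))
    (name : String) (distance : Int) :
    List (String × List String) → List String → List String
  | [], acc => acc
  | (z, _) :: rest, acc =>
    if name == z then
      if distance == 1 then pvChildren family_tree name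
      else pvALoop rec family_tree name distance rest
             ((pvChildren family_tree name).foldl (fun l x => l ++ rec x) acc)
    else pvALoop rec family_tree name distance rest acc

-- fuel makes A's recursion structural; every recursive call lowers distance by 1, so distance.toNat bounds it
def pvAFuel (family_tree : List (String × List String)) : Nat → String → Int → List String
  | 0, _, _ => []
  | fuel + 1, name, distance =>
    pvALoop (fun x => pvAFuel family_tree fuel x (distance - 1))
      family_tree name distance family_tree []

def descendants (family_tree : List (String × List String)) (name : String) (distance : Int) : List String :=
  pvAFuel family_tree distance.toNat name distance

-- ===== PORT B =====
-- 'for _ in range(distance)' with the early 'return []' on an empty frontier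
def pvBStep (family_tree : List (String × List String)) : Nat → List String → List String
  | 0, frontier => frontier
  | n + 1, frontier =>
    if frontier.isEmpty then []
    else pvBStep family_tree n
      (frontier.flatMap (fun node => (PySem.Dict.mk family_tree).getD node []))

def descendants_alt (family_tree : List (String × List String)) (name : String) (distance : Int) : List String :=
  if distance < 1 then []
  else pvBStep family_tree distance.toNat [name]

-- ===== PRECONDITION & SPEC =====
def pvKeys (family_tree : List (String × List String)) : List String :=
  family_tree.map Prod.fst

-- Nodes reachable from the set s in 0 .. bound-1 parent→child edge steps of the INPUT graph.
-- This is a property of the input dict only (any directed cycle among the keys has length ≤ number of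
-- keys, so bound = family_tree.length suffices); it does not run either algorithm.
def pvReach (family_tree : List (String × List String)) : Nat → List String → List String
  | 0, _ => []
  | fuel + 1, s => s ++ pvReach family_tree fuel (s.flatMap (pvChildren family_tree))

-- Pre_ excludes association lists with duplicate keys (they correspond to no Python dict) and the
-- inputs on which A raises: for non-positive distance, A's recursion runs unguarded down every path
-- from name, so it raises RecursionError exactly when some key reachable from name lies on a directed
-- cycle; everywhere else A returns normally.
def Pre_descendants (family_tree : List (String × List String)) (name : String) (distance : Int) : Prop :=
  (pvKeys family_tree).Nodup ∧
  (1 ≤ distance ∨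
    ∀ k ∈ pvReach family_tree (family_tree.length + 1) [name],
      k ∉ pvReach family_tree family_tree.length (pvChildren family_tree k))
instance (family_tree : List (String × List String)) (name : String) (distance : Int) : Decidable (Pre_descendants family_tree name distance) := by unfold Pre_descendants; infer_instance

def pvWitness_descendants : (List (String × List String)) × String × Int :=
  ([("a", ["b", "c"]), ("b", ["d", "e"]), ("c", ["f"])], "a", 2)

def Spec_descendants (family_tree : List (String × List String)) (name : String) (distance : Int) (out : List String) : Prop := out = descendants_alt family_tree name distance
instance (family_tree : List (String × List String)) (name : String) (distance : Int) (out : List String) : Decidable (Spec_descendants family_tree name distance out) := by unfold Spec_descendants; infer_instance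

-- ===== CLAIM (what is proved, stated in full; the proofs are below) =====
def Claim_equal_descendants : Prop := ∀ (family_tree : List (String × List String)) (name : String) (distance : Int), Dom_descendants family_tree name distance → Pre_descendants family_tree name distance → Spec_descendants family_tree name distance (descendants family_tree name distance)

-- ===== LEMMAS AND PROOFS =====

-- the pure one-generation expansion, and its n-fold iterate (B without the early exit)
def pvExpand (family_tree : List (String × List String)) (fr : List String) : List String :=
  fr.flatMap (pvChildren family_tree)

def pvIter (family_tree : List (String × List String)) : Nat → List String → List String
  | 0, fr => fr
  | n + 1, fr => pvIter family_tree n (pvExpand family_tree fr)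

lemma pvIter_nil (ft : List (String × List String)) (n : Nat) : pvIter ft n [] = [] := by
  induction n with
  | zero => rfl
  | succ n ih => simpa [pvIter, pvExpand] using ih

lemma pvBStep_eq_iter (ft : List (String × List String)) (n : Nat) (fr : List String) :
    pvBStep ft n fr = pvIter ft n fr := by
  induction n generalizing fr with
  | zero => rfl
  | succ n ih =>
    by_cases h : fr = []
    · subst h; simp [pvBStep, pvIter_nil]
    · rw [pvBStep, if_neg (by simpa [List.isEmpty_iff] using h), ih]
      rfl

lemma pvIter_append (ft : List (String × List String)) (n : Nat) (a b : List String) :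
    pvIter ft n (a ++ b) = pvIter ft n a ++ pvIter ft n b := by
  induction n generalizing a b with
  | zero => rfl
  | succ n ih => simp [pvIter, pvExpand, List.flatMap_append, ih]

lemma pvIter_flat (ft : List (String × List String)) (n : Nat) (l : List String) :
    pvIter ft n l = l.flatMap (fun x => pvIter ft n [x]) := by
  induction l with
  | nil => simp [pvIter_nil]
  | cons x t ih =>
    have : (x :: t) = [x] ++ t := rfl
    rw [this, pvIter_append, ih]; simp

lemma pvChildren_not_mem (ft : List (String × List String)) (k : String)
    (h : k ∉ pvKeys ft) : pvChildren ft k = [] := by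
  induction ft with
  | nil => rfl
  | cons p rest ih =>
    obtain ⟨z, v⟩ := p
    rw [show pvKeys ((z, v) :: rest) = z :: pvKeys rest from by simp [pvKeys],
      List.mem_cons] at h
    push Not at h
    simp only [pvChildren, PySem.Dict.getD]
    rw [PySem.Dict.get?_mk_cons, if_neg (by simpa using Ne.symm h.1)]
    simpa [pvChildren, PySem.Dict.getD] using ih h.2

lemma pvALoop_no_match (rec : String → List String) (ft : List (String × List String))
    (name : String) (d : Int) (entries : List (String × List String)) (acc : List String)
    (h : name ∉ entries.map Prod.fst) :
    pvALoop rec ft name d entries acc = acc := by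
  induction entries generalizing acc with
  | nil => rfl
  | cons p rest ih =>
    obtain ⟨z, v⟩ := p
    rw [List.map_cons, List.mem_cons] at h
    push Not at h
    simp [pvALoop, show (name == z) = false from by simpa using h.1, ih _ h.2]

lemma pvALoop_match (rec : String → List String) (ft : List (String × List String))
    (name : String) (d : Int) (entries : List (String × List String)) (acc : List String)
    (hnd : (entries.map Prod.fst).Nodup) (h : name ∈ entries.map Prod.fst) :
    pvALoop rec ft name d entries acc =
      if d = 1 then pvChildren ft name
      else (pvChildren ft name).foldl (fun l x => l ++ rec x) acc := by
  induction entries generalizing acc with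
  | nil => simp at h
  | cons p rest ih =>
    obtain ⟨z, v⟩ := p
    rw [List.map_cons] at hnd h
    obtain ⟨hzn, hndr⟩ := List.nodup_cons.mp hnd
    by_cases hz : name = z
    · subst hz
      simp only [pvALoop, beq_self_eq_true, if_true]
      by_cases hd : d = 1
      · simp [hd]
      · rw [if_neg (by simp [hd]), if_neg hd,
          pvALoop_no_match _ _ _ _ _ _ hzn]
    · have hmem : name ∈ rest.map Prod.fst := by
        rcases List.mem_cons.mp h with h1 | h1
        · exact absurd h1 hz
        · exact h1
      simp [pvALoop, show (name == z) = false from by simpa using hz, ih _ hndr hmem]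

lemma pvAFuel_succ (ft : List (String × List String)) (fuel : Nat) (name : String) (d : Int)
    (hnd : (pvKeys ft).Nodup) :
    pvAFuel ft (fuel + 1) name d =
      if name ∈ pvKeys ft then
        (if d = 1 then pvChildren ft name
         else (pvChildren ft name).flatMap (fun x => pvAFuel ft fuel x (d - 1)))
      else [] := by
  by_cases h : name ∈ pvKeys ft
  · rw [pvAFuel, pvALoop_match _ _ _ _ _ _ hnd h, if_pos h]
    by_cases hd : d = 1
    · simp [hd]
    · simp [hd, List.flatMap_def]
  · rw [pvAFuel, pvALoop_no_match _ _ _ _ _ _ h, if_neg h]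

lemma pvAFuel_eq_iter (ft : List (String × List String)) (hnd : (pvKeys ft).Nodup) :
    ∀ (k : Nat) (name : String) (d : Int), 1 ≤ d → d.toNat = k + 1 →
      pvAFuel ft (k + 1) name d = pvIter ft (k + 1) [name] := by
  intro k
  induction k with
  | zero =>
    intro name d h1 htn
    have hd : d = 1 := by omega
    subst hd
    rw [pvAFuel_succ _ _ _ _ hnd]
    have : pvIter ft 1 [name] = pvChildren ft name := by
      simp [pvIter, pvExpand]
    rw [this]
    by_cases h : name ∈ pvKeys ft
    · simp [h]
    · simp [h, pvChildren_not_mem ft name h]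
  | succ k ih =>
    intro name d h1 htn
    have hd2 : 2 ≤ d := by omega
    have hne : d ≠ 1 := by omega
    rw [pvAFuel_succ _ _ _ _ hnd, if_neg hne]
    have hrec : ∀ x, pvAFuel ft (k + 1) x (d - 1) = pvIter ft (k + 1) [x] := by
      intro x
      exact ih x (d - 1) (by omega) (by omega)
    have hrhs : pvIter ft (k + 1 + 1) [name] =
        (pvChildren ft name).flatMap (fun x => pvIter ft (k + 1) [x]) := by
      show pvIter ft (k + 1) (pvExpand ft [name]) = _
      have : pvExpand ft [name] = pvChildren ft name := by simp [pvExpand]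
      rw [this, pvIter_flat]
    rw [hrhs]
    by_cases h : name ∈ pvKeys ft
    · simp only [if_pos h]
      exact List.flatMap_congr (fun x _ => hrec x)
    · simp [h, pvChildren_not_mem ft name h]

-- ===== VERDICT (by name: the statement is the Claim_ definition above) =====
theorem descendants_spec : Claim_equal_descendants := by
  intro ft name d _ hpre
  unfold Spec_descendants descendants descendants_alt
  by_cases h : d < 1
  · have : d.toNat = 0 := by omega
    rw [if_pos h, this]; rfl
  · have h1 : 1 ≤ d := by omega
    have : d.toNat = (d.toNat - 1) + 1 := by omega
    rw [if_neg h, this, pvAFuel_eq_iter ft hpre.1 _ name d h1 this,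
      pvBStep_eq_iter]
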